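-- pv_equiv track=rewrite | github.com/eschondorf/advent-of-code | 2020/day1.py | find_product
-- ===== SOURCE A (Python) =====
-- def find_product(df_lst):
--     '''
--     find_product
--     computes the product of the pair and triple of
--     elements in the list that sum to 2020
--
--     Inputs:
--     - df_lst - list of values
--
--     0xx
--     00x
--     000
--     Returns: Tuple with product of pair and triple
--     '''
--     n = len(df_lst)
--     df_lst.sort()
--     soln_1 = None
--     soln_2 = None
--     for i in range(n-1):
--         for j in range(i+1,n):
--             if (df_lst[i] + df_lst[j] == 2020):
--                 soln_1 = df_lst[i]*df_lst[j]
--             elif (df_lst[i] + df_lst[j] > 2020):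
--                 break
--             for k in range(j+1, n):
--                 if (df_lst[i] + df_lst[j] + df_lst[k] == 2020):
--                     soln_2 = df_lst[i]*df_lst[j] * df_lst[k]
--                 elif (df_lst[i] + df_lst[j] + df_lst[k] > 2020):
--                     break
--     return soln_1, soln_2
-- ===== SOURCE B (Python) =====
-- def find_product(df_lst):
--     '''
--     find_product
--     computes the product of the pair and triple of
--     elements in the list that sum to 2020
--     (sorts df_lst in place, like the original)
--     '''
--     df_lst.sort()
--     soln_1 = None
--     soln_2 = None
--     # multiset of the elements not yet passed by the outer scan
--     suffix = {}
--     for v in df_lst: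
--         suffix[v] = suffix.get(v, 0) + 1
--     for i, v in enumerate(df_lst):
--         suffix[v] -= 1          # suffix now counts df_lst[i+1:]
--         if suffix.get(2020 - v, 0) > 0:
--             soln_1 = v * (2020 - v)
--         rest = suffix.copy()    # counts of the elements after the middle one
--         for w in df_lst[i + 1:]:
--             rest[w] -= 1
--             c = 2020 - v - w
--             if rest.get(c, 0) > 0:
--                 soln_2 = v * w * c
--     return soln_1, soln_2
-- ===== Notes on version B (the rewrite author's own statement) =====
-- stated objective: faster
-- what changed: Replaces A's triple nested index scan with one sorted pass that maintains a suffix multiset (dict of counts): the pair is found by a counter membership test per element and the triple by a single inner pass per element whose innermost scan disappears into a counter lookup, keeping A's last-match result because later matches in A's lexicographic order always have a product equal to the one determined by the same leading values.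
import Mathlib
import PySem

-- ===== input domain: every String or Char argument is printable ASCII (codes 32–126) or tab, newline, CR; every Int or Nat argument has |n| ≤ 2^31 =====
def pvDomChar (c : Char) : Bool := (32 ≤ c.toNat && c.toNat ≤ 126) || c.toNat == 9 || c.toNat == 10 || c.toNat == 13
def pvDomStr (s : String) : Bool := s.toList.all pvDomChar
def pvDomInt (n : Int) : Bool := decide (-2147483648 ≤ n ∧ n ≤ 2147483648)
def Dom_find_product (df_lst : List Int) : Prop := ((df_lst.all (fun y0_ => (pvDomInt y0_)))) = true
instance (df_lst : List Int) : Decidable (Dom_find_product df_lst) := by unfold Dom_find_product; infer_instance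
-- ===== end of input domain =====

-- B replaces A's O(n^3) triple index scan by an O(n^2) sorted pass with suffix count
-- dictionaries (the innermost scans become counter lookups); both versions sort the
-- argument in place in Python, and the equivalence proved here is about the return value.

-- ===== PORT A =====
-- the 'for k in range(j+1, n)' loop with its break, over the index list
def kLoopA (s : List Int) (v w : Int) : List Int → Option Int → Option Int
  | [], s2 => s2
  | k :: ks, s2 =>
    let c := PySem.List.pyGetD s k 0
    if v + w + c = 2020 then kLoopA s v w ks (some (v * w * c))
    else if v + w + c > 2020 then s2
    else kLoopA s v w ks s2

-- the 'for j in range(i+1, n)' loop with its break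
def jLoopA (s : List Int) (n : Int) (i : Int) :
    List Int → Option Int × Option Int → Option Int × Option Int
  | [], acc => acc
  | j :: js, acc =>
    let vi := PySem.List.pyGetD s i 0
    let vj := PySem.List.pyGetD s j 0
    if vi + vj = 2020 then
      jLoopA s n i js (some (vi * vj), kLoopA s vi vj (PySem.List.pyRange (j + 1) n 1) acc.2)
    else if vi + vj > 2020 then acc
    else jLoopA s n i js (acc.1, kLoopA s vi vj (PySem.List.pyRange (j + 1) n 1) acc.2)

def find_product (df_lst : List Int) : Option Int × Option Int :=
  let n := PySem.List.len df_lst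
  let s := PySem.List.sorted df_lst (fun x => x) false
  (PySem.List.pyRange 0 (n - 1) 1).foldl
    (fun acc i => jLoopA s n i (PySem.List.pyRange (i + 1) n 1) acc) (none, none)

-- ===== PORT B =====
def find_product_alt (df_lst : List Int) : Option Int × Option Int :=
  let s := PySem.List.sorted df_lst (fun x => x) false
  let suffix0 := s.foldl (fun d v => d.insert v (d.getD v 0 + 1))
    (PySem.Dict.empty : PySem.Dict Int Int)
  let st := (PySem.List.enumerate s 0).foldl
    (fun (st : PySem.Dict Int Int × Option Int × Option Int) p =>
      let suffix := st.1.insert p.2 (st.1.getD p.2 0 - 1)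
      let s1 := if suffix.getD (2020 - p.2) 0 > 0 then some (p.2 * (2020 - p.2)) else st.2.1
      let inner := (PySem.List.slice s (some (p.1 + 1)) none).foldl
        (fun (q : PySem.Dict Int Int × Option Int) w =>
          let rest := q.1.insert w (q.1.getD w 0 - 1)
          let c := 2020 - p.2 - w
          (rest, if rest.getD c 0 > 0 then some (p.2 * w * c) else q.2))
        (suffix, st.2.2)
      (suffix, s1, inner.2))
    (suffix0, none, none)
  (st.2.1, st.2.2)

-- ===== PRECONDITION & SPEC =====
def Spec_find_product (df_lst : List Int) (out : Option Int × Option Int) : Prop :=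
  out = find_product_alt df_lst
instance (df_lst : List Int) (out : Option Int × Option Int) :
    Decidable (Spec_find_product df_lst out) := by unfold Spec_find_product; infer_instance

-- ===== CLAIM (what is proved, stated in full; the proofs are below) =====
def Claim_equal_find_product : Prop :=
  ∀ (df_lst : List Int), Dom_find_product df_lst → Spec_find_product df_lst (find_product df_lst)

-- ===== LEMMAS AND PROOFS =====

-- value-level versions of A's loops (indices replaced by the suffix of the sorted list)
def kVals (v w : Int) : List Int → Option Int → Option Int
  | [], s2 => s2
  | c :: t, s2 =>
    if v + w + c = 2020 then kVals v w t (some (v * w * c))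
    else if v + w + c > 2020 then s2
    else kVals v w t s2

def jVals (v : Int) : List Int → Option Int × Option Int → Option Int × Option Int
  | [], acc => acc
  | w :: t, acc =>
    if v + w = 2020 then jVals v t (some (v * w), kVals v w t acc.2)
    else if v + w > 2020 then acc
    else jVals v t (acc.1, kVals v w t acc.2)

def oVals : List Int → Option Int × Option Int → Option Int × Option Int
  | [], acc => acc
  | v :: t, acc => oVals t (jVals v t acc)

-- value-level version of B's pass
def innerRef (v : Int) : List Int → Option Int → Option Int
  | [], s2 => s2
  | w :: t, s2 => innerRef v t (if (2020 - v - w) ∈ t then some (v * w * (2020 - v - w)) else s2)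

def bVals : List Int → Option Int × Option Int → Option Int × Option Int
  | [], acc => acc
  | v :: t, acc =>
    bVals t ((if (2020 - v) ∈ t then some (v * (2020 - v)) else acc.1), innerRef v t acc.2)

-- ---- A's index loops compute the value-level loops on the suffixes ----

theorem kLoopA_eq_kVals (s : List Int) (v w : Int) :
    ∀ (k : Nat) (s2 : Option Int),
      kLoopA s v w (PySem.List.pyRange (k : Int) (s.length : Int) 1) s2 = kVals v w (s.drop k) s2 := by
  intro k
  induction hn : s.length - k generalizing k with
  | zero =>
    intro s2
    have hk : s.length ≤ k := by omega
    rw [PySem.List.pyRange_one_eq_nil (by exact_mod_cast hk), List.drop_eq_nil_of_le hk]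
    rfl
  | succ n ih =>
    intro s2
    have hk : k < s.length := by omega
    rw [PySem.List.pyRange_one_cons (by exact_mod_cast hk),
        List.drop_eq_getElem_cons hk]
    show kLoopA s v w (↑k :: PySem.List.pyRange (↑k + 1) ↑s.length 1) s2 = _
    simp only [kLoopA, kVals, PySem.List.pyGetD_natCast, List.getD_eq_getElem?_getD,
      List.getElem?_eq_getElem hk, Option.getD_some]
    have hcast : ((k : Int) + 1) = ((k + 1 : Nat) : Int) := by push_cast; ring
    rw [hcast]
    split_ifs with h1 h2
    · exact ih (k+1) (by omega) _
    · rfl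
    · exact ih (k+1) (by omega) _

theorem jLoopA_eq_jVals (s : List Int) (i : Int) :
    ∀ (j : Nat) (acc : Option Int × Option Int),
      jLoopA s (s.length : Int) i (PySem.List.pyRange (j : Int) (s.length : Int) 1) acc =
        jVals (PySem.List.pyGetD s i 0) (s.drop j) acc := by
  intro j
  induction hn : s.length - j generalizing j with
  | zero =>
    intro acc
    have hj : s.length ≤ j := by omega
    rw [PySem.List.pyRange_one_eq_nil (by exact_mod_cast hj), List.drop_eq_nil_of_le hj]
    rfl
  | succ n ih =>
    intro acc
    have hj : j < s.length := by omega
    rw [PySem.List.pyRange_one_cons (by exact_mod_cast hj),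
        List.drop_eq_getElem_cons hj]
    show jLoopA s ↑s.length i (↑j :: PySem.List.pyRange (↑j + 1) ↑s.length 1) acc = _
    have hcast : ((j : Int) + 1) = ((j + 1 : Nat) : Int) := by push_cast; ring
    simp only [jLoopA, jVals]
    rw [show PySem.List.pyGetD s (↑j) 0 = s[j] by
      simp [PySem.List.pyGetD_natCast, List.getD_eq_getElem?_getD, List.getElem?_eq_getElem hj]]
    rw [hcast, kLoopA_eq_kVals s _ _ (j+1)]
    split_ifs with h1 h2
    · exact ih (j+1) (by omega) _
    · rfl
    · exact ih (j+1) (by omega) _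

theorem foldA_eq_oVals (s : List Int) :
    ∀ (a : Nat) (acc : Option Int × Option Int),
      (PySem.List.pyRange (a : Int) ((s.length : Int) - 1) 1).foldl
          (fun acc i => jLoopA s (s.length : Int) i
            (PySem.List.pyRange (i + 1) (s.length : Int) 1) acc) acc =
        oVals (s.drop a) acc := by
  intro a
  induction hn : s.length - a generalizing a with
  | zero =>
    intro acc
    have ha : s.length ≤ a := by omega
    rw [PySem.List.pyRange_one_eq_nil (by
          have : (s.length : Int) ≤ (a : Int) := by exact_mod_cast ha
          omega),
        List.drop_eq_nil_of_le ha]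
    rfl
  | succ n ih =>
    intro acc
    have ha : a < s.length := by omega
    rw [List.drop_eq_getElem_cons ha]
    by_cases hlast : a + 1 = s.length
    · rw [PySem.List.pyRange_one_eq_nil (by
        have : (a : Int) + 1 = (s.length : Int) := by exact_mod_cast hlast
        omega)]
      have : s.drop (a + 1) = [] := List.drop_eq_nil_of_le (by omega)
      simp [oVals, jVals, this]
    · rw [PySem.List.pyRange_one_cons (by
        have : (a : Int) + 1 < (s.length : Int) := by exact_mod_cast (by omega : a + 1 < s.length)
        omega)]
      simp only [List.foldl_cons, oVals]
      have hcast : ((a : Int) + 1) = ((a + 1 : Nat) : Int) := by push_cast; ring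
      rw [hcast, jLoopA_eq_jVals s _ (a+1)]
      rw [show PySem.List.pyGetD s (↑a) 0 = s[a] by
        simp [PySem.List.pyGetD_natCast, List.getD_eq_getElem?_getD, List.getElem?_eq_getElem ha]]
      exact ih (a+1) (by omega) _

-- ---- on a sorted suffix the breaks prune only non-matches ----

theorem kVals_sorted (v w : Int) :
    ∀ (t : List Int), t.Pairwise (· ≤ ·) → ∀ s2,
      kVals v w t s2 = if (2020 - v - w) ∈ t then some (v * w * (2020 - v - w)) else s2 := by
  intro t
  induction t with
  | nil => intro _ s2; simp [kVals]
  | cons c t ih =>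
    intro hp s2
    rw [List.pairwise_cons] at hp
    obtain ⟨hle, hp'⟩ := hp
    rw [show kVals v w (c :: t) s2 =
        (if v + w + c = 2020 then kVals v w t (some (v * w * c))
         else if v + w + c > 2020 then s2 else kVals v w t s2) from rfl]
    by_cases h1 : v + w + c = 2020
    · rw [if_pos h1, ih hp']
      have hc : c = 2020 - v - w := by omega
      subst hc
      simp
    · rw [if_neg h1]
      by_cases h2 : v + w + c > 2020
      · have hnot : (2020 - v - w) ∉ c :: t := by
          intro hmem
          rcases List.mem_cons.mp hmem with h | h
          · omega
          · have := hle _ h; omega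
        rw [if_pos h2, if_neg hnot]
      · rw [if_neg h2, ih hp']
        have hne : ¬ ((2020 - v - w) = c) := by omega
        simp [List.mem_cons, hne]

theorem innerRef_of_big (v : Int) :
    ∀ (l : List Int), (∀ x ∈ l, 2020 < v + x) → (∀ x ∈ l, 1010 < x) → ∀ s2,
      innerRef v l s2 = s2 := by
  intro l
  induction l with
  | nil => intro _ _ s2; rfl
  | cons w t ih =>
    intro hbig hpos s2
    simp only [innerRef]
    have hnot : (2020 - v - w) ∉ t := by
      intro hmem
      have h1 := hpos _ (List.mem_cons_of_mem _ hmem)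
      have h2 := hbig w (List.mem_cons_self ..)
      omega
    rw [if_neg hnot]
    exact ih (fun x hx => hbig x (List.mem_cons_of_mem _ hx))
      (fun x hx => hpos x (List.mem_cons_of_mem _ hx)) s2

theorem jVals_sorted (v : Int) :
    ∀ (t : List Int), t.Pairwise (· ≤ ·) → (∀ x ∈ t, v ≤ x) → ∀ acc,
      jVals v t acc =
        ((if (2020 - v) ∈ t then some (v * (2020 - v)) else acc.1), innerRef v t acc.2) := by
  intro t
  induction t with
  | nil => intro _ _ acc; rfl
  | cons w t ih =>
    intro hp hv acc
    rw [List.pairwise_cons] at hp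
    obtain ⟨hle, hp'⟩ := hp
    have hvw : v ≤ w := hv _ (List.mem_cons_self ..)
    rw [show jVals v (w :: t) acc =
        (if v + w = 2020 then jVals v t (some (v * w), kVals v w t acc.2)
         else if v + w > 2020 then acc
         else jVals v t (acc.1, kVals v w t acc.2)) from rfl,
       show innerRef v (w :: t) acc.2 =
        innerRef v t (if (2020 - v - w) ∈ t then some (v * w * (2020 - v - w)) else acc.2) from rfl]
    by_cases h1 : v + w = 2020
    · rw [if_pos h1, ih hp' (fun x hx => hv x (List.mem_cons_of_mem _ hx)),
          kVals_sorted v w t hp']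
      have hw : w = 2020 - v := by omega
      subst hw
      simp
    · rw [if_neg h1]
      by_cases h2 : v + w > 2020
      · rw [if_pos h2]
        have hnotp : (2020 - v) ∉ w :: t := by
          intro hmem
          rcases List.mem_cons.mp hmem with h | h
          · omega
          · have := hle _ h; omega
        have hnott : (2020 - v - w) ∉ t := by
          intro hmem
          have := hle _ hmem; omega
        rw [if_neg hnotp, if_neg hnott, innerRef_of_big v t
          (by intro x hx; have := hle _ hx; omega)
          (by intro x hx; have := hle _ hx; omega)]
      · rw [if_neg h2, ih hp' (fun x hx => hv x (List.mem_cons_of_mem _ hx)),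
            kVals_sorted v w t hp']
        have hne : ¬ ((2020 - v) = w) := by omega
        simp [List.mem_cons, hne]

theorem oVals_eq_bVals :
    ∀ (t : List Int), t.Pairwise (· ≤ ·) → ∀ acc, oVals t acc = bVals t acc := by
  intro t
  induction t with
  | nil => intro _ acc; rfl
  | cons v t ih =>
    intro hp acc
    rw [List.pairwise_cons] at hp
    obtain ⟨hle, hp'⟩ := hp
    simp only [oVals, bVals]
    rw [jVals_sorted v t hp' hle acc, ih hp']

-- ---- B's counter passes compute the value-level pass ----

theorem innerB_eq_innerRef (v : Int) :
    ∀ (l : List Int) (d : PySem.Dict Int Int) (s2 : Option Int),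
      (∀ x : Int, d.getD x 0 = (l.count x : Int)) →
      (l.foldl
        (fun (q : PySem.Dict Int Int × Option Int) w =>
          let rest := q.1.insert w (q.1.getD w 0 - 1)
          let c := 2020 - v - w
          (rest, if rest.getD c 0 > 0 then some (v * w * c) else q.2))
        (d, s2)).2 = innerRef v l s2 := by
  intro l
  induction l with
  | nil => intro d s2 _; rfl
  | cons w t ih =>
    intro d s2 hd
    have hrest : ∀ x : Int, (d.insert w (d.getD w 0 - 1)).getD x 0 = (t.count x : Int) := by
      intro x
      rw [PySem.Dict.getD_insert]
      by_cases hx : x = w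
      · subst hx
        rw [if_pos rfl, hd x, List.count_cons_self]
        push_cast; ring
      · rw [if_neg hx, hd x, List.count_cons]
        have hwx : ¬ w = x := fun h => hx h.symm
        simp [hwx]
    have hcond : ((d.insert w (d.getD w 0 - 1)).getD (2020 - v - w) 0 > 0) ↔ (2020 - v - w) ∈ t := by
      rw [hrest]
      constructor
      · intro h
        exact List.count_pos_iff.mp (by exact_mod_cast h)
      · intro h
        exact_mod_cast List.count_pos_iff.mpr h
    rw [List.foldl_cons]
    refine (ih _ _ hrest).trans ?_
    show innerRef v t _ = innerRef v t (if (2020 - v - w) ∈ t then some (v * w * (2020 - v - w)) else s2)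
    congr 1
    by_cases hmem : (2020 - v - w) ∈ t
    · rw [if_pos (hcond.mpr hmem), if_pos hmem]
    · rw [if_neg (fun h => hmem (hcond.mp h)), if_neg hmem]

theorem outerB_eq_bVals (s : List Int) :
    ∀ (t : List Int) (k : Nat), s.drop k = t →
      ∀ (d : PySem.Dict Int Int) (s1 s2 : Option Int),
        (∀ x : Int, d.getD x 0 = (t.count x : Int)) →
        ((PySem.List.enumerate t (k : Int)).foldl
          (fun (st : PySem.Dict Int Int × Option Int × Option Int) p =>
            let suffix := st.1.insert p.2 (st.1.getD p.2 0 - 1)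
            let s1 := if suffix.getD (2020 - p.2) 0 > 0 then some (p.2 * (2020 - p.2)) else st.2.1
            let inner := (PySem.List.slice s (some (p.1 + 1)) none).foldl
              (fun (q : PySem.Dict Int Int × Option Int) w =>
                let rest := q.1.insert w (q.1.getD w 0 - 1)
                let c := 2020 - p.2 - w
                (rest, if rest.getD c 0 > 0 then some (p.2 * w * c) else q.2))
              (suffix, st.2.2)
            (suffix, s1, inner.2))
          (d, s1, s2)).2 = bVals t (s1, s2) := by
  intro t
  induction t with
  | nil => intro k _ d s1 s2 _; rfl
  | cons v t ih =>
    intro k hdrop d s1 s2 hd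
    have hcast : ((k : Int) + 1) = ((k + 1 : Nat) : Int) := by push_cast; ring
    have hdrop' : s.drop (k + 1) = t := by
      have h1 := congrArg List.tail hdrop
      simpa [List.tail_drop] using h1
    have hrest : ∀ x : Int, (d.insert v (d.getD v 0 - 1)).getD x 0 = (t.count x : Int) := by
      intro x
      rw [PySem.Dict.getD_insert]
      by_cases hx : x = v
      · subst hx
        rw [if_pos rfl, hd x, List.count_cons_self]
        push_cast; ring
      · rw [if_neg hx, hd x, List.count_cons]
        have hwx : ¬ v = x := fun h => hx h.symm
        simp [hwx]
    have hcond : ((d.insert v (d.getD v 0 - 1)).getD (2020 - v) 0 > 0) ↔ (2020 - v) ∈ t := by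
      rw [hrest]
      constructor
      · intro h
        exact List.count_pos_iff.mp (by exact_mod_cast h)
      · intro h
        exact_mod_cast List.count_pos_iff.mpr h
    rw [PySem.List.enumerate_cons, List.foldl_cons, hcast]
    refine (ih (k + 1) hdrop' _ _ _ hrest).trans ?_
    show bVals t (_, _) = bVals t
      ((if (2020 - v) ∈ t then some (v * (2020 - v)) else s1), innerRef v t s2)
    have hslice : PySem.List.slice s (some ((k + 1 : Nat) : Int)) none = t := by
      rw [PySem.List.slice_from_natCast, hdrop']
    refine congrArg (bVals t) ?_
    show ((if (d.insert v (d.getD v 0 - 1)).getD (2020 - v) 0 > 0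
            then some (v * (2020 - v)) else s1),
          (List.foldl
            (fun (q : PySem.Dict Int Int × Option Int) w =>
              let rest := q.1.insert w (q.1.getD w 0 - 1)
              let c := 2020 - v - w
              (rest, if rest.getD c 0 > 0 then some (v * w * c) else q.2))
            (d.insert v (d.getD v 0 - 1), s2)
            (PySem.List.slice s (some ((k + 1 : Nat) : Int)) none)).2) = _
    rw [hslice, innerB_eq_innerRef v t _ s2 hrest]
    by_cases hmem : (2020 - v) ∈ t
    · rw [if_pos (hcond.mpr hmem), if_pos hmem]
    · rw [if_neg (fun h => hmem (hcond.mp h)), if_neg hmem]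

theorem both_eq (df_lst : List Int) : find_product df_lst = find_product_alt df_lst := by
  have hsl : (PySem.List.sorted df_lst (fun x => x) false).length = df_lst.length :=
    PySem.List.length_sorted ..
  set s := PySem.List.sorted df_lst (fun x => x) false with hs
  have hsorted : s.Pairwise (· ≤ ·) := PySem.List.sorted_pairwise ..
  have hA := foldA_eq_oVals s 0 (none, none)
  rw [hsl, List.drop_zero] at hA
  have hcnt : ∀ x : Int,
      (s.foldl (fun d v => d.insert v (d.getD v 0 + 1))
        (PySem.Dict.empty : PySem.Dict Int Int)).getD x 0 = (s.count x : Int) := by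
    intro x
    rw [PySem.Dict.foldl_insert_getD_add_one_eq_counter, PySem.Dict.getD_counter]
  have hB := outerB_eq_bVals s s 0 rfl _ none none hcnt
  refine Eq.trans (show find_product df_lst = oVals s (none, none) from hA) ?_
  refine Eq.trans (oVals_eq_bVals s hsorted (none, none)) ?_
  exact (Prod.mk.eta.trans hB).symm

-- ===== VERDICT (by name: the statement is the Claim_ definition above) =====
theorem find_product_spec : Claim_equal_find_product := by
  intro df_lst _
  unfold Spec_find_product
  exact both_eq df_lst
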